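-- pv_equiv track=rewrite | github.com/Noor-Nasri/daily-leetcode | 952-word-subsets/word-subsets.py | isUniversal
-- ===== SOURCE A (Python) =====
-- def isUniversal(word, requiredLetterCounts):
--     letters = [0 for i in range(26)]
--     for let in word:
--         letters[ord(let) - 97] += 1
--
--     for ind in range(26):
--         if letters[ind] < requiredLetterCounts[ind]:
--             return False
--
--     return True
-- ===== SOURCE B (Python) =====
-- def isUniversal(word, requiredLetterCounts):
--     # Different algorithm: sort the word, run-length encode the sorted runs into a
--     # dict, then check every required count against its run length.
--     sw = sorted(word)
--     runs = {}
--     i = 0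
--     n = len(sw)
--     while i < n:
--         j = i
--         while j < n and sw[j] == sw[i]:
--             j += 1
--         runs[sw[i]] = j - i
--         i = j
--     return all(runs.get(chr(ind + 97), 0) >= requiredLetterCounts[ind] for ind in range(26))
-- ===== Notes on version B (the rewrite author's own statement) =====
-- stated objective: alternative
-- what changed: B replaces A's one-pass 26-entry frequency table with a sort-then-scan algorithm: it sorts the word, run-length encodes the sorted runs into a dict via a two-pointer while loop, and then checks each of the 26 required counts against the run lengths.
import Mathlib
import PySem

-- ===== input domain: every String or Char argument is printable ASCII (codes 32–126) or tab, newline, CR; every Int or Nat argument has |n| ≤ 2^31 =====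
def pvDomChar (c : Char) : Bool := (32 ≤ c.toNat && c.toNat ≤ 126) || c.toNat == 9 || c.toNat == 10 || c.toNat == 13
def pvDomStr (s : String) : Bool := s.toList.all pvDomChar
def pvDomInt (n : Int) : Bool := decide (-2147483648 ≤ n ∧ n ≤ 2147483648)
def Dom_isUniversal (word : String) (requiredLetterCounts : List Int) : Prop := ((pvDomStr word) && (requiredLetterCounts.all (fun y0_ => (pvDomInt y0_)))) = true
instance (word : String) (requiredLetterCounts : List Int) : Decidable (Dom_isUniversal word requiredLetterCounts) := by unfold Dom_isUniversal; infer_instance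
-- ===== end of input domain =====

-- B replaces A's 26-entry frequency table by a different algorithm: sort the word,
-- run-length encode the sorted runs into a dict, then check the 26 required counts;
-- an alternative of similar cost, not faster.

-- ===== PORT A =====
-- 'for ind in range(26): if letters[ind] < requiredLetterCounts[ind]: return False'
-- (pyGetD's default 0 is only read where Python would raise IndexError; Pre_ excludes those inputs)
def isUniversalLoop (letters req : List Int) : List Int → Bool
  | [] => true
  | i :: rest =>
    if PySem.List.pyGetD letters i 0 < PySem.List.pyGetD req i 0 then false
    else isUniversalLoop letters req rest

def isUniversal (word : String) (requiredLetterCounts : List Int) : Bool :=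
  -- letters = [0 for i in range(26)]; for let in word: letters[ord(let) - 97] += 1
  let letters0 : List Int := (PySem.List.pyRange 0 26 1).map (fun _ => 0)
  let letters := word.toList.foldl
    (fun L c => PySem.List.pySetD L ((c.toNat : Int) - 97)
        (PySem.List.pyGetD L ((c.toNat : Int) - 97) 0 + 1)) letters0
  isUniversalLoop letters requiredLetterCounts (PySem.List.pyRange 0 26 1)

-- ===== PORT B =====
-- the outer 'while i < n' walks run by run; the inner 'while j < n and sw[j] == sw[i]'
-- is the scan of the equal prefix (takeWhile); 'i = j' jumps past it (dropWhile)
def rleGo (runs : PySem.Dict Char Int) : List Char → PySem.Dict Char Int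
  | [] => runs
  | c :: rest =>
      rleGo (runs.insert c ((((rest.takeWhile (· == c)).length + 1 : Nat) : Int)))
            (rest.dropWhile (· == c))
  termination_by l => l.length
  decreasing_by
    have := List.length_dropWhile_le (· == c) rest
    simp; omega

def isUniversal_alt (word : String) (requiredLetterCounts : List Int) : Bool :=
  -- sw = sorted(word); runs = {} built by the while loops;
  -- all(runs.get(chr(ind+97),0) >= requiredLetterCounts[ind] for ind in range(26))
  -- (pyGetD's default 0 is only read where Python would raise IndexError; Pre_ excludes those inputs)
  let sw := PySem.List.sorted word.toList (fun x => x) false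
  let runs := rleGo PySem.Dict.empty sw
  (PySem.List.pyRange 0 26 1).all (fun i =>
    decide (PySem.List.pyGetD requiredLetterCounts i 0 ≤ runs.getD (Char.ofNat (i + 97).toNat) 0))

-- ===== PRECONDITION & SPEC =====
-- Pre_ = exactly where A returns: a lowercase word (on non-lowercase characters A either
-- raises IndexError (codes < 71 or > 122) or silently counts 'G'..'`' as letters through
-- negative-index wraparound, an accident not worth matching), and a count table that is
-- either full (26 entries) or short with an early shortfall index, at which A returns
-- False before its IndexError at the missing index (B raises the same IndexError there).
def Pre_isUniversal (word : String) (requiredLetterCounts : List Int) : Prop :=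
  word.toList.all (fun c => decide (97 ≤ c.toNat) && decide (c.toNat ≤ 122)) = true
    ∧ (26 ≤ requiredLetterCounts.length
        ∨ ∃ i < requiredLetterCounts.length, i < 26 ∧
            (word.toList.count (Char.ofNat (i + 97)) : Int)
              < PySem.List.pyGetD requiredLetterCounts (i : Int) 0)
instance (word : String) (requiredLetterCounts : List Int) : Decidable (Pre_isUniversal word requiredLetterCounts) := by unfold Pre_isUniversal; infer_instance

def pvWitness_isUniversal : String × List Int :=
  ("ab", [1, 1, 2])

def Spec_isUniversal (word : String) (requiredLetterCounts : List Int) (out : Bool) : Prop := out = isUniversal_alt word requiredLetterCounts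
instance (word : String) (requiredLetterCounts : List Int) (out : Bool) : Decidable (Spec_isUniversal word requiredLetterCounts out) := by unfold Spec_isUniversal; infer_instance

-- ===== CLAIM (what is proved, stated in full; the proofs are below) =====
def Claim_equal_isUniversal : Prop := ∀ (word : String) (requiredLetterCounts : List Int), Dom_isUniversal word requiredLetterCounts → Pre_isUniversal word requiredLetterCounts → Spec_isUniversal word requiredLetterCounts (isUniversal word requiredLetterCounts)

-- ===== LEMMAS AND PROOFS =====

theorem char_eq_iff_toNat (a b : Char) : a = b ↔ a.toNat = b.toNat := by
  constructor
  · intro h; rw [h]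
  · intro h; exact Char.ext (UInt32.toNat_inj.mp h)

theorem toNat_ofNat_letter (n : Nat) (h : n < 26) : (Char.ofNat (n + 97)).toNat = n + 97 := by
  have hv : Nat.isValidChar (n + 97) := by left; omega
  simp [Char.ofNat, hv]

-- A's frequency table holds, at each letter index, the count of that letter in the word scanned so far.
theorem build_count (cs : List Char) (hcs : ∀ c ∈ cs, 97 ≤ c.toNat ∧ c.toNat ≤ 122)
    (L : List Int) (hl : L.length = 26) (n : Nat) (hn : n < 26) :
    PySem.List.pyGetD
      (cs.foldl (fun L c => PySem.List.pySetD L ((c.toNat : Int) - 97)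
        (PySem.List.pyGetD L ((c.toNat : Int) - 97) 0 + 1)) L) (n : Int) 0
      = PySem.List.pyGetD L (n : Int) 0 + (cs.count (Char.ofNat (n + 97)) : Int) := by
  induction cs generalizing L with
  | nil => simp
  | cons c cs ih =>
    obtain ⟨h1, h2⟩ := hcs c List.mem_cons_self
    have hm : ((c.toNat : Int) - 97) = ((c.toNat - 97 : Nat) : Int) := by omega
    have hmlt : c.toNat - 97 < L.length := by omega
    rw [List.foldl_cons, hm,
      ih (fun d hd => hcs d (List.mem_cons_of_mem _ hd)) _
        (by rw [PySem.List.length_pySetD, hl]),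
      PySem.List.pyGetD_pySetD_natCast _ _ _ _ _ hmlt, List.count_cons]
    by_cases h : c = Char.ofNat (n + 97)
    · have hc2 : c.toNat = n + 97 := by rw [h]; exact toNat_ofNat_letter n hn
      have hceq : c.toNat - 97 = n := by omega
      have hb : (c == Char.ofNat (n + 97)) = true := by simp [h]
      rw [hceq, if_pos rfl, hb]
      simp
      ring
    · have hcn : ¬ n = c.toNat - 97 := by
        intro heq
        apply h
        rw [char_eq_iff_toNat, toNat_ofNat_letter n hn]
        omega
      have hb : (c == Char.ofNat (n + 97)) = false := by simp [h]
      rw [if_neg hcn, hb]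
      simp

-- the freshly built table: length 26, all zeros
theorem letters0_length : ((PySem.List.pyRange 0 26 1).map (fun _ => (0 : Int))).length = 26 := by
  simp [PySem.List.length_pyRange_one]

theorem letters0_get (n : Nat) (hn : n < 26) :
    PySem.List.pyGetD ((PySem.List.pyRange 0 26 1).map (fun _ => (0 : Int))) (n : Int) 0 = 0 := by
  exact PySem.List.pyGetD_map_pyRange _ _ _ _ hn

-- B's run-length dict of a sorted list: lookup = count in the list
theorem rleGo_getD (l : List Char) (hs : l.Pairwise (· ≤ ·)) (d : PySem.Dict Char Int)
    (c : Char) :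
    (rleGo d l).getD c 0 = if c ∈ l then (l.count c : Int) else d.getD c 0 := by
  induction hn : l.length using Nat.strong_induction_on generalizing l d with
  | _ n ih =>
  cases l with
  | nil => simp [rleGo]
  | cons a rest =>
    have hsr : (rest.dropWhile (· == a)).Pairwise (· ≤ ·) :=
      hs.sublist ((List.dropWhile_sublist (· == a)).cons a)
    have hlen : (rest.dropWhile (· == a)).length < n := by
      have := List.length_dropWhile_le (· == a) rest
      simp at hn; omega
    have ht : ∀ x ∈ rest.takeWhile (· == a), x = a := by
      intro x hx
      simpa using List.mem_takeWhile_imp hx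
    have hanr : a ∉ rest.dropWhile (· == a) := by
      cases hr : rest.dropWhile (· == a) with
      | nil => simp
      | cons b r' =>
        have hba : ¬ (b == a) = true := by
          have := List.head?_dropWhile_not (· == a) rest
          rw [hr] at this; simpa using this
        have hab : a ≤ b := by
          have hbmem : b ∈ rest := (List.dropWhile_sublist (· == a)).mem (by simp [hr])
          exact (List.pairwise_cons.mp hs).1 b hbmem
        have halt : a < b := lt_of_le_of_ne hab (fun h => hba (by simp [h.symm]))
        intro hmem
        rcases List.mem_cons.mp hmem with h | h
        · exact absurd h.symm (ne_of_gt halt)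
        · have hbx : b ≤ a := by
            have hp := List.pairwise_cons.mp (hr ▸ hsr)
            exact hp.1 a h
          exact absurd halt (not_lt.mpr hbx)
    have hsplit : rest = rest.takeWhile (· == a) ++ rest.dropWhile (· == a) :=
      (List.takeWhile_append_dropWhile).symm
    have hcount_t : (rest.takeWhile (· == a)).count a = (rest.takeWhile (· == a)).length := by
      rw [List.count_eq_length]
      intro x hx; simp [ht x hx]
    rw [rleGo, ih _ hlen _ hsr _ rfl]
    by_cases hcr : c ∈ rest.dropWhile (· == a)
    · have hca : c ≠ a := fun h => hanr (h ▸ hcr)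
      have hcl : c ∈ (a :: rest) := by
        refine List.mem_cons_of_mem _ ?_
        rw [hsplit]; exact List.mem_append_right _ hcr
      rw [if_pos hcr, if_pos hcl]
      congr 1
      rw [List.count_cons, hsplit, List.count_append]
      have hct : (rest.takeWhile (· == a)).count c = 0 := by
        rw [List.count_eq_zero]
        intro hmem; exact hca (ht c hmem)
      have hac : ¬ a = c := fun h => hca h.symm
      simp [hct, hac]
    · rw [if_neg hcr]
      by_cases hca : c = a
      · subst hca
        rw [PySem.Dict.getD_insert, if_pos rfl, if_pos List.mem_cons_self]
        have hcr2 : rest.count c = (rest.takeWhile (· == c)).length := by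
          conv_lhs => rw [hsplit]
          rw [List.count_append, hcount_t, List.count_eq_zero.mpr hanr, Nat.add_zero]
        rw [List.count_cons_self, hcr2]
      · rw [PySem.Dict.getD_insert, if_neg hca]
        have hcl : c ∉ (a :: rest) := by
          intro hmem
          rcases List.mem_cons.mp hmem with h | h
          · exact hca h
          · rw [hsplit] at h
            rcases List.mem_append.mp h with h | h
            · exact hca (ht c h)
            · exact hcr h
        rw [if_neg hcl]

-- B's dict lookup at a letter is the letter's count in the word
theorem runs_getD (word : String) (n : Nat) :
    (rleGo PySem.Dict.empty (PySem.List.sorted word.toList (fun x => x) false)).getD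
        (Char.ofNat (n + 97)) 0
      = (word.toList.count (Char.ofNat (n + 97)) : Int) := by
  have hperm : (PySem.List.sorted word.toList (fun x => x) false).Perm word.toList :=
    PySem.List.sorted_perm _ _ _
  have hcnt := hperm.count_eq (Char.ofNat (n + 97))
  rw [rleGo_getD _ (PySem.List.sorted_pairwise _ _) _ _]
  by_cases hmem : Char.ofNat (n + 97) ∈ PySem.List.sorted word.toList (fun x => x) false
  · rw [if_pos hmem, hcnt]
  · rw [if_neg hmem, PySem.Dict.getD_empty]
    have : word.toList.count (Char.ofNat (n + 97)) = 0 := by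
      rw [← hcnt, List.count_eq_zero]; exact hmem
    rw [this]; simp

-- A's early-return loop over range(26) equals B's all() once the table entries match B's dict
theorem loop_eq (letters req : List Int) (f : Int → Int)
    (hcount : ∀ i : Int, 0 ≤ i → i < 26 → PySem.List.pyGetD letters i 0 = f i)
    (idxs : List Int) (hidx : ∀ i ∈ idxs, 0 ≤ i ∧ i < 26) :
    isUniversalLoop letters req idxs
      = idxs.all (fun i => decide (PySem.List.pyGetD req i 0 ≤ f i)) := by
  induction idxs with
  | nil => rfl
  | cons i rest ih =>
    obtain ⟨h0, h26⟩ := hidx i List.mem_cons_self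
    simp only [isUniversalLoop, List.all_cons]
    rw [hcount i h0 h26]
    by_cases hlt : f i < PySem.List.pyGetD req i 0
    · rw [if_pos hlt]
      simp [not_le.mpr hlt]
    · rw [if_neg hlt]
      rw [ih (fun j hj => hidx j (List.mem_cons_of_mem _ hj))]
      simp [not_lt.mp hlt]

-- ===== VERDICT (by name: the statement is the Claim_ definition above) =====
theorem isUniversal_spec : Claim_equal_isUniversal := by
  intro word req _hdom hpre
  unfold Spec_isUniversal isUniversal isUniversal_alt
  apply loop_eq _ _
    (fun i => (rleGo PySem.Dict.empty (PySem.List.sorted word.toList (fun x => x) false)).getD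
        (Char.ofNat (i + 97).toNat) 0)
  · intro i h0 h26
    have hn : i.toNat < 26 := by omega
    have hi : (i.toNat : Int) = i := by omega
    have hch : (i + 97).toNat = i.toNat + 97 := by omega
    rw [← hi, build_count word.toList (fun c hc => by simpa using List.all_eq_true.mp hpre.1 c hc) _ letters0_length i.toNat hn,
      letters0_get i.toNat hn, zero_add, hi, hch, runs_getD word i.toNat]
  · intro i hi
    have := PySem.List.mem_pyRange_one.mp hi
    omega
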